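-- pv_equiv track=rewrite | github.com/juniarta-rendy/HackerRank | Certification/Problem Solving (Basic)/MaximumCostOfLaptopCount.py | maxCost
-- ===== SOURCE A (Python) =====
-- def maxCost(cost, labels, dailyCount):
--     c_cost = 0
--     c_label = 0
--     maxCost = 0
--
--     for c,l in zip(cost,labels):
--         c_cost += c
--         if l == 'illegal':
--             continue
--         c_label +=1
--         if c_label == dailyCount:
--             maxCost = max(maxCost,c_cost)
--             c_cost = 0
--             c_label = 0
--     return maxCost
-- ===== SOURCE B (Python) =====
-- def maxCost(cost, labels, dailyCount):
--     if dailyCount <= 0: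
--         return 0
--     P = [0]
--     run = 0
--     for c in cost:
--         run = run + c
--         P.append(run)
--     legal = [i for i, l in enumerate(labels[:len(cost)]) if l != 'illegal']
--     best = 0
--     prev = 0
--     k = dailyCount - 1
--     while k < len(legal):
--         end = legal[k] + 1
--         best = max(best, P[end] - P[prev])
--         prev = end
--         k = k + dailyCount
--     return best
-- ===== Notes on version B (the rewrite author's own statement) =====
-- stated objective: alternative
-- what changed: Replaces the single stateful pass (running cost, running legal counter, reset on batch completion) by a prefix-sum array plus the list of legal indices: batch boundaries are read off directly as every dailyCount-th legal index and each batch cost is a difference of two prefix sums.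
import Mathlib
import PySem

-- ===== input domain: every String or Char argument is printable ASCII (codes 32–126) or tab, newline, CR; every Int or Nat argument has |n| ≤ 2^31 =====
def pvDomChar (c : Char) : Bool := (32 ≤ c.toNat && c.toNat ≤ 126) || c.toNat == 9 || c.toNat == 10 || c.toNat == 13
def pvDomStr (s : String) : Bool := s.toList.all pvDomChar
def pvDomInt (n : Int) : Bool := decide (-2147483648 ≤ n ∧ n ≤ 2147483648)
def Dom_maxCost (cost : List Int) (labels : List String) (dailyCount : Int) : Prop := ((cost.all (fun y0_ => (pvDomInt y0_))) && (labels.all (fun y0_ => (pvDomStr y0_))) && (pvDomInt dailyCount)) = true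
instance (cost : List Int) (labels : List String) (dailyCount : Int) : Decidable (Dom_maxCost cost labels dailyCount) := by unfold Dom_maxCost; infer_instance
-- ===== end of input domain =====

-- B replaces A's single stateful pass by prefix sums + the list of legal indices (alternative
-- decomposition, same asymptotic cost); return values agree on all inputs.

-- ===== PORT A =====
-- one loop iteration of A's for-loop over zip(cost, labels); state = (c_cost, c_label, maxCost)
def pvAStep (dailyCount : Int) (st : Int × Int × Int) (cl : Int × String) : Int × Int × Int :=
  let cc := st.1 + cl.1
  if cl.2 == "illegal" then (cc, st.2.1, st.2.2)
  else if st.2.1 + 1 == dailyCount then (0, 0, max st.2.2 cc)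
  else (cc, st.2.1 + 1, st.2.2)

def maxCost (cost : List Int) (labels : List String) (dailyCount : Int) : Int :=
  ((cost.zip labels).foldl (pvAStep dailyCount) (0, 0, 0)).2.2

-- ===== PORT B =====
-- Source B: P = [0]; run = 0; for c in cost: run += c; P.append(run)
def pvPrefixB (cost : List Int) : List Int :=
  (cost.foldl (fun (st : List Int × Int) c => (st.1 ++ [st.2 + c], st.2 + c)) ([0], 0)).1

-- Source B's while-loop; the stride dailyCount is passed as s = dailyCount - 1 (a Nat, so the
-- step k + (s+1) is positive and the loop terminates); the guarded call below uses
-- s = dailyCount.toNat - 1, i.e. s + 1 = dailyCount since dailyCount ≥ 1 there.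
def pvLoopB (P legal : List Int) (s : Nat) (prev best k : Int) : Int :=
  if h : k < (legal.length : Int) then
    let e := PySem.List.pyGetD legal k 0 + 1
    let best' := max best (PySem.List.pyGetD P e 0 - PySem.List.pyGetD P prev 0)
    pvLoopB P legal s e best' (k + ((s : Int) + 1))
  else best
termination_by ((legal.length : Int) - k).toNat
decreasing_by omega

def maxCost_alt (cost : List Int) (labels : List String) (dailyCount : Int) : Int :=
  if dailyCount ≤ 0 then 0
  else
    let P := pvPrefixB cost
    let legal := ((PySem.List.enumerate (labels.take cost.length) 0).filter
        (fun il => il.2 != "illegal")).map (·.1)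
    pvLoopB P legal (dailyCount.toNat - 1) 0 0 (dailyCount - 1)

-- ===== PRECONDITION & SPEC =====
def Spec_maxCost (cost : List Int) (labels : List String) (dailyCount : Int) (out : Int) : Prop := out = maxCost_alt cost labels dailyCount
instance (cost : List Int) (labels : List String) (dailyCount : Int) (out : Int) : Decidable (Spec_maxCost cost labels dailyCount out) := by unfold Spec_maxCost; infer_instance

-- ===== CLAIM (what is proved, stated in full; the proofs are below) =====
def Claim_equal_maxCost : Prop := ∀ (cost : List Int) (labels : List String) (dailyCount : Int), Dom_maxCost cost labels dailyCount → Spec_maxCost cost labels dailyCount (maxCost cost labels dailyCount)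

-- ===== LEMMAS AND PROOFS =====

-- zs abbreviates zip cost labels throughout the proofs
def pvSumc (zs : List (Int × String)) : Int := (zs.map (·.1)).sum
def pvNleg (zs : List (Int × String)) : Nat := zs.countP (fun z => z.2 != "illegal")

-- legal indices of zs, numbered from i
def pvLegalZ (i : Int) : List (Int × String) → List Int
  | [] => []
  | z :: zs => if z.2 != "illegal" then i :: pvLegalZ (i + 1) zs else pvLegalZ (i + 1) zs

-- elements of l at positions 0, s+1, 2(s+1), …
def pvPick (s : Nat) : List Int → List Int
  | [] => []
  | x :: xs => x :: pvPick s (xs.drop s)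
termination_by l => l.length
decreasing_by simp [List.length_drop]

-- reference form of B's loop, phrased on zs with prefix sums as sums of takes
def pvBval (zs : List (Int × String)) (prev best : Int) : List Int → Int
  | [] => best
  | i :: is => pvBval zs (i + 1) (max best (pvSumc (zs.take (i + 1).toNat) - pvSumc (zs.take prev.toNat))) is


-- ---- A-side lemmas ----

-- with a non-positive dailyCount the batch test never fires and maxCost stays m
theorem pvA_nonpos (d : Int) (hd : d ≤ 0) :
    ∀ (zs : List (Int × String)) (cc cl m : Int), 0 ≤ cl →
      ((zs.foldl (pvAStep d) (cc, cl, m)).2.2) = m := by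
  intro zs
  induction zs with
  | nil => intro cc cl m _; rfl
  | cons z zs ih =>
    intro cc cl m hcl
    simp only [List.foldl_cons, pvAStep]
    by_cases hz : z.2 == "illegal"
    · simp only [hz, if_pos]; exact ih _ _ _ hcl
    · simp only [hz, Bool.false_eq_true, if_false]
      have hne : (cl + 1 == d) = false := by
        simp only [beq_eq_false_iff_ne, ne_eq]; omega
      simp only [hne, Bool.false_eq_true, if_false]
      exact ih _ _ _ (by omega)

-- if fewer than d - cl legal items remain, the batch never completes
theorem pvA_nofinish (d : Int) :
    ∀ (zs : List (Int × String)) (cc cl m : Int), (pvNleg zs : Int) + cl < d →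
      ((zs.foldl (pvAStep d) (cc, cl, m)).2.2) = m := by
  intro zs
  induction zs with
  | nil => intro cc cl m _; rfl
  | cons z zs ih =>
    intro cc cl m hlt
    simp only [List.foldl_cons, pvAStep]
    by_cases hz : z.2 == "illegal"
    · have hz' : (z.2 != "illegal") = false := by simp [bne, hz]
      simp only [hz, if_pos]
      exact ih _ _ _ (by simp only [pvNleg, List.countP_cons, hz'] at hlt ⊢; omega)
    · have hz' : (z.2 != "illegal") = true := by simp [bne, hz]
      have hcnt : (pvNleg (z :: zs) : Int) = (pvNleg zs : Int) + 1 := by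
        simp [pvNleg, hz']
      have hne : (cl + 1 == d) = false := by
        simp only [beq_eq_false_iff_ne, ne_eq]; omega
      simp only [hz, Bool.false_eq_true, if_false, hne]
      exact ih _ _ _ (by omega)

-- the maxCost component threads through max
theorem pvA_max (d : Int) :
    ∀ (zs : List (Int × String)) (cc cl m b : Int),
      ((zs.foldl (pvAStep d) (cc, cl, max m b)).2.2) = max m ((zs.foldl (pvAStep d) (cc, cl, b)).2.2) := by
  intro zs
  induction zs with
  | nil => intro cc cl m b; rfl
  | cons z zs ih =>
    intro cc cl m b
    simp only [List.foldl_cons, pvAStep]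
    by_cases hz : z.2 == "illegal"
    · simp only [hz, if_pos]; exact ih _ _ _ _
    · simp only [hz, Bool.false_eq_true, if_false]
      by_cases hdone : (cl + 1 == d) = true
      · simp only [hdone, if_pos]
        have : max (max m b) (cc + z.1) = max m (max b (cc + z.1)) := by omega
        rw [this]; exact ih _ _ _ _
      · simp only [hdone, Bool.false_eq_true, if_false]; exact ih _ _ _ _

-- sum of first components
theorem pvSumc_append (xs ys : List (Int × String)) :
    pvSumc (xs ++ ys) = pvSumc xs + pvSumc ys := by
  simp [pvSumc]

-- consuming one whole batch: pre holds d - cl - 1 legals, z is the completing legal item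
theorem pvA_batch (d : Int) :
    ∀ (pre : List (Int × String)) (z : Int × String) (rest : List (Int × String)) (cc cl m : Int),
      (pvNleg pre : Int) = d - cl - 1 → (z.2 != "illegal") = true →
      ((pre ++ z :: rest).foldl (pvAStep d) (cc, cl, m)) =
        (rest.foldl (pvAStep d) (0, 0, max m (cc + pvSumc (pre ++ [z])))) := by
  intro pre
  induction pre with
  | nil =>
    intro z rest cc cl m hcnt hz
    have hz' : (z.2 == "illegal") = false := by
      cases h : (z.2 == "illegal") <;> simp [bne, h] at hz ⊢
    have hd : (cl + 1 == d) = true := by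
      simp only [pvNleg, List.countP_nil, Nat.cast_zero] at hcnt
      simp only [beq_iff_eq]; omega
    simp only [List.nil_append, List.foldl_cons, pvAStep, hz', Bool.false_eq_true, if_false,
      hd, if_pos, pvSumc, List.map_cons, List.map_nil, List.sum_cons, List.sum_nil]
    ring_nf
  | cons w pre ih =>
    intro z rest cc cl m hcnt hz
    simp only [List.cons_append, List.foldl_cons, pvAStep]
    by_cases hw : w.2 == "illegal"
    · have hw' : (w.2 != "illegal") = false := by simp [bne, hw]
      have hcnt' : (pvNleg pre : Int) = d - cl - 1 := by
        simp only [pvNleg, List.countP_cons, hw'] at hcnt ⊢; simpa using hcnt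
      simp only [hw, if_pos]
      rw [ih z rest (cc + w.1) cl m hcnt' hz]
      congr 2
      simp [pvSumc]
      omega
    · have hw' : (w.2 != "illegal") = true := by simp [bne, hw]
      have hcnt' : (pvNleg pre : Int) = d - (cl + 1) - 1 := by
        simp only [pvNleg, List.countP_cons, hw'] at hcnt ⊢
        push_cast at hcnt ⊢; omega
      have hne : (cl + 1 == d) = false := by
        have : (0:Int) ≤ (pvNleg pre : Int) := Int.natCast_nonneg _
        simp only [beq_eq_false_iff_ne, ne_eq]; omega
      simp only [hw, Bool.false_eq_true, if_false, hne]
      rw [ih z rest (cc + w.1) (cl + 1) m hcnt' hz]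
      congr 2
      simp [pvSumc]
      omega


-- ---- legal-index-list lemmas ----

theorem pvLegalZ_shift (zs : List (Int × String)) :
    ∀ s t : Int, pvLegalZ (s + t) zs = (pvLegalZ s zs).map (· + t) := by
  induction zs with
  | nil => intro s t; rfl
  | cons z zs ih =>
    intro s t
    by_cases hz : (z.2 != "illegal") = true
    · simp only [pvLegalZ, hz, if_pos, List.map_cons]
      rw [show s + t + 1 = (s + 1) + t by ring, ih (s + 1) t]
    · simp only [pvLegalZ, hz, Bool.false_eq_true, if_false]
      rw [show s + t + 1 = (s + 1) + t by ring, ih (s + 1) t]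

theorem pvLegalZ_shift0 (zs : List (Int × String)) (t : Int) :
    pvLegalZ t zs = (pvLegalZ 0 zs).map (· + t) := by
  have := pvLegalZ_shift zs 0 t
  simpa using this

theorem pvLegalZ_append (xs ys : List (Int × String)) :
    ∀ s : Int, pvLegalZ s (xs ++ ys) = pvLegalZ s xs ++ pvLegalZ (s + xs.length) ys := by
  induction xs with
  | nil =>
    intro s
    simp only [List.nil_append, pvLegalZ, List.length_nil, Nat.cast_zero, Int.add_zero]
  | cons x xs ih =>
    intro s
    have harg : s + (((x :: xs).length : Nat) : Int) = (s + 1) + ((xs.length : Nat) : Int) := by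
      simp only [List.length_cons]; push_cast; ring
    rw [harg]
    by_cases hx : (x.2 != "illegal") = true
    · simp [List.cons_append, pvLegalZ, hx, ih (s + 1)]
    · simp [List.cons_append, pvLegalZ, hx, ih (s + 1)]

theorem pvLegalZ_length (zs : List (Int × String)) :
    ∀ s : Int, (pvLegalZ s zs).length = pvNleg zs := by
  induction zs with
  | nil => intro s; rfl
  | cons z zs ih =>
    intro s
    by_cases hz : (z.2 != "illegal") = true
    · simp [pvLegalZ, hz, ih, pvNleg]
    · simp [pvLegalZ, hz, ih, pvNleg]

theorem pvLegalZ_bounds (zs : List (Int × String)) :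
    ∀ (s : Int) (i : Int), i ∈ pvLegalZ s zs → s ≤ i ∧ i < s + zs.length := by
  induction zs with
  | nil => intro s i h; simp [pvLegalZ] at h
  | cons z zs ih =>
    intro s i h
    by_cases hz : (z.2 != "illegal") = true
    · simp only [pvLegalZ, hz, if_pos, List.mem_cons] at h
      rcases h with h | h
      · subst h; simp only [List.length_cons]; push_cast; omega
      · have := ih (s + 1) i h; simp at *; omega
    · simp only [pvLegalZ, hz, Bool.false_eq_true, if_false] at h
      have := ih (s + 1) i h; simp at *; omega

-- ---- pick lemmas ----

theorem pvPick_map_add (s : Nat) (t : Int) :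
    ∀ l : List Int, pvPick s (l.map (· + t)) = (pvPick s l).map (· + t) := by
  intro l
  induction l using pvPick.induct s with
  | case1 => simp [pvPick]
  | case2 x xs ih =>
    simp only [List.map_cons, pvPick, List.map_drop] at *
    rw [ih]

theorem pvPick_mem (s : Nat) :
    ∀ (l : List Int) (x : Int), x ∈ pvPick s l → x ∈ l := by
  intro l
  induction l using pvPick.induct s with
  | case1 => intro x h; simp [pvPick] at h
  | case2 y ys ih =>
    intro x h
    simp only [pvPick, List.mem_cons] at h
    rcases h with h | h
    · simp [h]
    · exact List.mem_cons_of_mem _ (List.mem_of_mem_drop (ih x h))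

-- ---- pvBval lemmas ----

theorem pvBval_max (zs : List (Int × String)) :
    ∀ (is : List Int) (prev m b : Int),
      pvBval zs prev (max m b) is = max m (pvBval zs prev b is) := by
  intro is
  induction is with
  | nil => intro prev m b; rfl
  | cons i is ih =>
    intro prev m b
    simp only [pvBval]
    have : max (max m b) (pvSumc (zs.take (i + 1).toNat) - pvSumc (zs.take prev.toNat)) =
        max m (max b (pvSumc (zs.take (i + 1).toNat) - pvSumc (zs.take prev.toNat))) := by omega
    rw [this, ih]

-- dropping an already-processed prefix from zs shifts all indices down by its length
theorem pvBval_shift (pre rest : List (Int × String)) :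
    ∀ (is : List Int), (∀ i ∈ is, 0 ≤ i) → ∀ (p b : Int), 0 ≤ p →
      pvBval (pre ++ rest) (p + pre.length) b (is.map (· + (pre.length : Int))) =
        pvBval rest p b is := by
  intro is
  induction is with
  | nil => intro _ p b _; rfl
  | cons i is ih =>
    intro hpos p b hp
    have hi : (0:Int) ≤ i := hpos i (List.mem_cons_self)
    simp only [List.map_cons, pvBval]
    have hsum : ∀ x : Int, 0 ≤ x →
        pvSumc ((pre ++ rest).take (x + (pre.length : Int)).toNat) =
          pvSumc pre + pvSumc (rest.take x.toNat) := by
      intro x hx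
      have : (x + (pre.length : Int)).toNat = pre.length + x.toNat := by omega
      rw [this, List.take_append]
      have h3 : pre.length + x.toNat - pre.length = x.toNat := by omega
      rw [h3, List.take_of_length_le (Nat.le_add_right _ _), pvSumc_append]
    have h1 : (i + (pre.length : Int) + 1) = (i + 1) + (pre.length : Int) := by ring
    rw [h1, hsum (i + 1) (by omega), hsum p hp]
    have h2 : pvSumc pre + pvSumc (rest.take (i + 1).toNat) -
        (pvSumc pre + pvSumc (rest.take p.toNat)) =
        pvSumc (rest.take (i + 1).toNat) - pvSumc (rest.take p.toNat) := by ring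
    rw [h2]
    exact ih (fun j hj => hpos j (List.mem_cons_of_mem _ hj)) (i + 1) _ (by omega)


-- ---- characterizing B's components ----

theorem pvPrefixB_snoc (pre : List Int) (c : Int) :
    (List.range ((pre ++ [c]).length + 1)).map (fun i => ((pre ++ [c]).take i).sum) =
      (List.range (pre.length + 1)).map (fun i => (pre.take i).sum) ++ [pre.sum + c] := by
  rw [List.length_append, List.length_singleton, List.range_succ, List.map_append]
  congr 1
  · apply List.map_congr_left
    intro i hi
    simp only [List.mem_range] at hi
    rw [List.take_append_of_le_length (by omega)]
  · simp

theorem pvPrefixB_aux :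
    ∀ (rest pre : List Int),
      rest.foldl (fun (st : List Int × Int) c => (st.1 ++ [st.2 + c], st.2 + c))
        ((List.range (pre.length + 1)).map (fun i => (pre.take i).sum), pre.sum) =
      ((List.range ((pre ++ rest).length + 1)).map (fun i => ((pre ++ rest).take i).sum),
        (pre ++ rest).sum) := by
  intro rest
  induction rest with
  | nil => intro pre; simp
  | cons c rest ih =>
    intro pre
    simp only [List.foldl_cons]
    rw [← pvPrefixB_snoc pre c, show pre.sum + c = (pre ++ [c]).sum by simp]
    rw [ih (pre ++ [c])]
    simp

theorem pvPrefixB_eq (cost : List Int) :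
    pvPrefixB cost = (List.range (cost.length + 1)).map (fun i => (cost.take i).sum) := by
  have h := congrArg Prod.fst (pvPrefixB_aux cost [])
  simpa [pvPrefixB] using h

theorem pvPrefixB_getD (cost : List Int) (x : Int) (h0 : 0 ≤ x) (h1 : x ≤ cost.length) :
    PySem.List.pyGetD (pvPrefixB cost) x 0 = (cost.take x.toNat).sum := by
  rw [pvPrefixB_eq]
  have hlen : ((List.range (cost.length + 1)).map (fun i => (cost.take i).sum)).length =
      cost.length + 1 := by simp
  rw [PySem.List.pyGetD_eq_getElem _ _ h0 (by rw [hlen]; omega)]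
  rw [List.getElem_map, List.getElem_range]

-- the comprehension over enumerate(labels[:len cost]) is pvLegalZ over the zip
theorem pvZip_map_snd : ∀ (cost : List Int) (labels : List String),
    (cost.zip labels).map (·.2) = labels.take cost.length := by
  intro cost
  induction cost with
  | nil => intro labels; simp
  | cons c cost ih =>
    intro labels
    cases labels with
    | nil => simp
    | cons l labels => simp [List.zip_cons_cons, ih]

theorem pvZip_map_fst : ∀ (cost : List Int) (labels : List String),
    (cost.zip labels).map (·.1) = cost.take labels.length := by
  intro cost
  induction cost with
  | nil => intro labels; simp
  | cons c cost ih =>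
    intro labels
    cases labels with
    | nil => simp
    | cons l labels => simp [List.zip_cons_cons, ih]

theorem pvEnum_filter (zs : List (Int × String)) :
    ∀ s : Int,
      ((PySem.List.enumerate (zs.map (·.2)) s).filter (fun il => il.2 != "illegal")).map (·.1) =
        pvLegalZ s zs := by
  induction zs with
  | nil => intro s; simp [PySem.List.enumerate_nil, pvLegalZ]
  | cons z zs ih =>
    intro s
    simp only [List.map_cons, PySem.List.enumerate_cons, List.filter_cons]
    by_cases hz : (z.2 != "illegal") = true
    · simp only [hz, if_pos, List.map_cons, ih (s + 1), pvLegalZ]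
    · simp only [hz, Bool.false_eq_true, if_false, ih (s + 1), pvLegalZ]

-- ---- B's loop computes pvBval over picked indices ----

theorem pvSumc_take_zip (cost : List Int) (labels : List String) (j : Nat)
    (hj : j ≤ (cost.zip labels).length) :
    (cost.take j).sum = pvSumc ((cost.zip labels).take j) := by
  have h1 : ((cost.zip labels).take j).map (·.1) = ((cost.zip labels).map (·.1)).take j := by
    rw [List.map_take]
  have h2 : (cost.zip labels).length = min cost.length labels.length := List.length_zip
  rw [h2] at hj
  have hj1 : j ≤ cost.length := by omega
  have hj2 : j ≤ labels.length := by omega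
  rw [pvSumc, h1, pvZip_map_fst, List.take_take, show min j labels.length = j by omega]

theorem pvLoopB_char (P legal : List Int) (s : Nat) (zs : List (Int × String))
    (HP : ∀ x : Int, 0 ≤ x → x ≤ zs.length → PySem.List.pyGetD P x 0 = pvSumc (zs.take x.toNat))
    (Hleg : ∀ i ∈ legal, 0 ≤ i ∧ i < (zs.length : Int)) :
    ∀ (fuel : Nat) (k prev best : Int), ((legal.length : Int) - k).toNat ≤ fuel →
      0 ≤ k → 0 ≤ prev → prev ≤ zs.length →
      pvLoopB P legal s prev best k = pvBval zs prev best (pvPick s (legal.drop k.toNat)) := by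
  intro fuel
  induction fuel with
  | zero =>
    intro k prev best hfuel hk hp1 hp2
    have hk' : (legal.length : Int) ≤ k := by omega
    rw [pvLoopB]
    rw [dif_neg (by omega)]
    rw [List.drop_eq_nil_of_le (by omega), pvPick, pvBval]
  | succ fuel ih =>
    intro k prev best hfuel hk hp1 hp2
    by_cases hklt : k < (legal.length : Int)
    · have hkn : k.toNat < legal.length := by omega
      rw [pvLoopB, dif_pos hklt]
      have hdrop : legal.drop k.toNat = legal[k.toNat] :: legal.drop (k.toNat + 1) :=
        List.drop_eq_getElem_cons hkn
      rw [hdrop, pvPick]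
      have hi := Hleg legal[k.toNat] (List.getElem_mem hkn)
      have hget : PySem.List.pyGetD legal k 0 = legal[k.toNat] :=
        PySem.List.pyGetD_eq_getElem _ _ hk hklt
      simp only [hget, pvBval]
      rw [HP (legal[k.toNat] + 1) (by omega) (by omega), HP prev hp1 (by exact_mod_cast hp2)]
      have hdd : (legal.drop (k.toNat + 1)).drop s = legal.drop (k + ((s : Int) + 1)).toNat := by
        rw [List.drop_drop]
        congr 1
        omega
      rw [hdd]
      exact ih (k + ((s : Int) + 1)) _ _ (by omega) (by omega) (by omega) (by omega)
    · rw [pvLoopB, dif_neg hklt]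
      rw [List.drop_eq_nil_of_le (by omega), pvPick, pvBval]


-- ---- splitting off the first full batch ----

theorem pvSplit : ∀ (zs : List (Int × String)) (k : Nat), k < pvNleg zs →
    ∃ pre z rest, zs = pre ++ z :: rest ∧ pvNleg pre = k ∧ (z.2 != "illegal") = true := by
  intro zs
  induction zs with
  | nil => intro k hk; simp [pvNleg] at hk
  | cons w zs ih =>
    intro k hk
    by_cases hw : (w.2 != "illegal") = true
    · cases k with
      | zero => exact ⟨[], w, zs, rfl, rfl, hw⟩
      | succ k =>
        have hk' : k < pvNleg zs := by
          simp [pvNleg, hw] at hk ⊢; omega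
        obtain ⟨pre, z, rest, h1, h2, h3⟩ := ih k hk'
        exact ⟨w :: pre, z, rest, by rw [h1]; rfl,
          by simp [pvNleg, hw] at h2 ⊢; omega, h3⟩
    · have hk' : k < pvNleg zs := by
        simp only [pvNleg, List.countP_cons, hw] at hk ⊢; simpa using hk
      obtain ⟨pre, z, rest, h1, h2, h3⟩ := ih k hk'
      exact ⟨w :: pre, z, rest, by rw [h1]; rfl,
        by simp [pvNleg, hw] at h2 ⊢; omega, h3⟩

-- ---- the main equivalence on the zipped list ----

theorem pvMain (d : Int) (hd : 1 ≤ d) :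
    ∀ (n : Nat) (zs : List (Int × String)), zs.length ≤ n →
      ((zs.foldl (pvAStep d) (0, 0, 0)).2.2) =
        pvBval zs 0 0 (pvPick (d.toNat - 1) ((pvLegalZ 0 zs).drop (d.toNat - 1))) := by
  intro n
  induction n with
  | zero =>
    intro zs h
    have hz : zs = [] := List.eq_nil_of_length_eq_zero (by omega)
    subst hz
    simp [pvLegalZ, pvPick, pvBval]
  | succ n ih =>
    intro zs hlen
    by_cases hfew : (pvNleg zs : Int) < d
    · rw [pvA_nofinish d zs 0 0 0 (by omega)]
      have hdrop : (pvLegalZ 0 zs).drop (d.toNat - 1) = [] :=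
        List.drop_eq_nil_of_le (by rw [pvLegalZ_length]; omega)
      rw [hdrop, pvPick, pvBval]
    · rw [Int.not_lt] at hfew
      obtain ⟨pre, z, rest, hzs, hpre, hzleg⟩ := pvSplit zs (d.toNat - 1) (by omega)
      subst hzs
      set S := pvSumc (pre ++ [z]) with hS
      -- LHS: consume the first batch, then pull the max out
      have hL := pvA_batch d pre z rest 0 0 0 (by rw [hpre]; omega) hzleg
      have l2 : ((pre ++ z :: rest).foldl (pvAStep d) (0, 0, 0)).2.2 =
          max (max 0 S) ((rest.foldl (pvAStep d) (0, 0, 0)).2.2) := by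
        rw [hL, show max 0 (0 + S) = max (max 0 S) 0 by omega, pvA_max]
      -- RHS: the picked index list starts with pre.length and continues shifted by pre.length+1
      have hlegsplit : pvLegalZ 0 (pre ++ z :: rest) =
          pvLegalZ 0 pre ++ ((pre.length : Int) ::
            (pvLegalZ 0 rest).map (· + ((pre.length : Int) + 1))) := by
        rw [pvLegalZ_append pre (z :: rest) 0]
        congr 1
        rw [show (0 : Int) + pre.length = (pre.length : Int) by ring]
        simp only [pvLegalZ, hzleg, if_pos]
        rw [pvLegalZ_shift0 rest ((pre.length : Int) + 1)]
      have hdropL : (pvLegalZ 0 (pre ++ z :: rest)).drop (d.toNat - 1) =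
          (pre.length : Int) :: (pvLegalZ 0 rest).map (· + ((pre.length : Int) + 1)) := by
        rw [hlegsplit, show d.toNat - 1 = (pvLegalZ 0 pre).length by
          rw [pvLegalZ_length]; omega, List.drop_left]
      have hpick : pvPick (d.toNat - 1) ((pvLegalZ 0 (pre ++ z :: rest)).drop (d.toNat - 1)) =
          (pre.length : Int) ::
            (pvPick (d.toNat - 1) ((pvLegalZ 0 rest).drop (d.toNat - 1))).map
              (· + ((pre.length : Int) + 1)) := by
        rw [hdropL, pvPick, ← List.map_drop, pvPick_map_add]
      set T := pvPick (d.toNat - 1) ((pvLegalZ 0 rest).drop (d.toNat - 1)) with hT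
      have htake : (pre ++ z :: rest).take ((pre.length : Int) + 1).toNat = pre ++ [z] := by
        rw [show ((pre.length : Int) + 1).toNat = pre.length + 1 by omega, List.take_append]
        rw [List.take_of_length_le (by omega)]
        simp
      have hTpos : ∀ i ∈ T, 0 ≤ i := by
        intro i hi
        exact (pvLegalZ_bounds rest 0 i (List.mem_of_mem_drop (pvPick_mem _ _ i hi))).1
      have hshift := pvBval_shift (pre ++ [z]) rest T hTpos 0 (max (max 0 S) 0) (le_refl 0)
      rw [List.append_assoc, List.singleton_append] at hshift
      have hcastlen : ((pre ++ [z]).length : Int) = (pre.length : Int) + 1 := by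
        simp
      rw [hcastlen, Int.zero_add] at hshift
      have hrest : rest.length ≤ n := by
        simp only [List.length_append, List.length_cons] at hlen; omega
      rw [l2, hpick, pvBval, htake]
      have hz0 : (pre ++ z :: rest).take ((0 : Int)).toNat = [] := by simp
      rw [hz0]
      have hb : max 0 (pvSumc (pre ++ [z]) - pvSumc []) = max (max 0 S) 0 := by
        have h0 : pvSumc ([] : List (Int × String)) = 0 := rfl
        rw [h0, hS]
        omega
      rw [hb, hshift, pvBval_max, ih rest hrest]

theorem maxCost_spec : Claim_equal_maxCost := by
  intro cost labels d _
  unfold Spec_maxCost maxCost maxCost_alt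
  by_cases hd : d ≤ 0
  · rw [if_pos hd]
    exact pvA_nonpos d hd (cost.zip labels) 0 0 0 (le_refl 0)
  · rw [if_neg hd]
    have hd1 : (1 : Int) ≤ d := by omega
    have hleg : ((PySem.List.enumerate (labels.take cost.length) 0).filter
        (fun il => il.2 != "illegal")).map (·.1) = pvLegalZ 0 (cost.zip labels) := by
      rw [← pvZip_map_snd, pvEnum_filter]
    rw [hleg]
    have hlenz : (cost.zip labels).length ≤ cost.length := by
      rw [List.length_zip]; omega
    have HP : ∀ x : Int, 0 ≤ x → x ≤ (cost.zip labels).length →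
        PySem.List.pyGetD (pvPrefixB cost) x 0 = pvSumc ((cost.zip labels).take x.toNat) := by
      intro x h0 h1
      rw [pvPrefixB_getD cost x h0 (by omega)]
      exact pvSumc_take_zip cost labels x.toNat (by omega)
    have Hleg : ∀ i ∈ pvLegalZ 0 (cost.zip labels),
        0 ≤ i ∧ i < ((cost.zip labels).length : Int) := by
      intro i hi
      have := pvLegalZ_bounds (cost.zip labels) 0 i hi
      omega
    rw [pvLoopB_char (pvPrefixB cost) (pvLegalZ 0 (cost.zip labels)) (d.toNat - 1)
      (cost.zip labels) HP Hleg ((pvLegalZ 0 (cost.zip labels)).length : Nat) (d - 1) 0 0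
      (by omega) (by omega) (by omega) (by simp)]
    rw [show (d - 1).toNat = d.toNat - 1 by omega]
    exact pvMain d hd1 (cost.zip labels).length (cost.zip labels) (le_refl _)
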